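-- pv_equiv track=rewrite | github.com/FinColombia/FinalGVTfm | procesamientoDirecciones.py | delete_after_third_number
-- ===== SOURCE A (Python) =====
-- def get_third_number_index(lista):
--     index = []
--     for i in range(len(lista)):
--         if lista[i].isdigit():
--             index.append(i)
--     return index[2]
--
-- def delete_after_third_number(direcciones_split):
--     for i in direcciones_split:
--         if i[0] == '*':
--             i[i.index('*'):] = ['Fuera de Bogota']
--         else:
--             try:
--                 del i[get_third_number_index(i)+1:]
--             except IndexError:
--                 pass
--
--     return direcciones_split
-- ===== SOURCE B (Python) =====
-- def delete_after_third_number(direcciones_split):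
--     for toks in direcciones_split:
--         if toks[0] == '*':
--             toks[:] = ['Fuera de Bogota']
--         else:
--             kept = []
--             count = 0
--             for tok in toks:
--                 kept.append(tok)
--                 if tok.isdigit():
--                     count += 1
--                     if count == 3:
--                         break
--             toks[:] = kept
--     return direcciones_split
-- ===== Notes on version B (the rewrite author's own statement) =====
-- stated objective: simpler
-- what changed: Inlines the helper and replaces build-all-digit-indices-then-[2] with try/except by a single pass per sublist that keeps tokens and stops right after the third digit token.
import Mathlib
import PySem

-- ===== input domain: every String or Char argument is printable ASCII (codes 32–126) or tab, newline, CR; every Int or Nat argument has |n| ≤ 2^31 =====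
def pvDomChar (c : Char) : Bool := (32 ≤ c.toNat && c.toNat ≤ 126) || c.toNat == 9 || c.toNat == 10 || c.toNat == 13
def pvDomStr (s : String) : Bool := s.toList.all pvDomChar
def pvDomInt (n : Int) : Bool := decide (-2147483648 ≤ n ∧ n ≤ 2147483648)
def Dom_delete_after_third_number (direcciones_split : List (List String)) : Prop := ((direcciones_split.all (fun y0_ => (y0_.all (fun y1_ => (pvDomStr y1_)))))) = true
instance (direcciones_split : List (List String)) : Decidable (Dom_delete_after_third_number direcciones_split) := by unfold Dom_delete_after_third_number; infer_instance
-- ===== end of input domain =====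

-- B inlines the helper and keeps the prefix up to the third digit token in one pass with a
-- counter, instead of building the full list of digit indices and indexing it at [2] behind
-- try/except (objective: simpler). Both Pythons mutate the sublists in place and return the
-- same outer list; the equivalence proved here is about the return value.

-- ===== PORT A =====
-- get_third_number_index: collect indices of digit tokens over range(len), then index[2];
-- index[2] raises IndexError when fewer than 3 digits — modelled as Option via pyGet?.
def pvDigitIndices (lista : List String) : List Int :=
  (PySem.List.pyRange 0 (lista.length : Int) 1).foldl
    (fun index i =>
      if PySem.Str.strIsdigit (PySem.List.pyGetD lista i "") then index ++ [i] else index) []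

-- the try/except IndexError around `del i[get_third_number_index(i)+1:]`
def pvRowA (i : List String) : List String :=
  match PySem.List.pyGet? i 0 with
  | none => i          -- i[0] on an empty row raises IndexError (excluded by Pre_)
  | some h =>
    if h = "*" then
      -- i[i.index('*'):] = ['Fuera de Bogota']  (keep the prefix before the first '*')
      match PySem.List.index? i "*" with
      | some j => i.take j ++ ["Fuera de Bogota"]
      | none => i      -- unreachable: i[0] = '*'
    else
      match PySem.List.pyGet? (pvDigitIndices i) 2 with
      | some k => PySem.List.slice i none (some (k + 1))   -- del i[k+1:] keeps i[:k+1]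
      | none => i      -- IndexError caught: pass

def delete_after_third_number (direcciones_split : List (List String)) : List (List String) :=
  direcciones_split.map pvRowA

-- ===== PORT B =====
-- single pass: keep tokens, counting digit tokens, stop right after the third one
def pvKeepUntilThird : List String → Nat → List String
  | [], _ => []
  | t :: ts, c =>
    if PySem.Str.strIsdigit t then
      (if c + 1 = 3 then [t] else t :: pvKeepUntilThird ts (c + 1))
    else t :: pvKeepUntilThird ts c

def pvRowB (toks : List String) : List String :=
  match PySem.List.pyGet? toks 0 with
  | none => toks       -- toks[0] on an empty row raises IndexError (excluded by Pre_)
  | some h => if h = "*" then ["Fuera de Bogota"] else pvKeepUntilThird toks 0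

def delete_after_third_number_alt (direcciones_split : List (List String)) : List (List String) :=
  direcciones_split.map pvRowB

-- ===== PRECONDITION & SPEC =====
-- Both A and B raise IndexError ([0] on an empty row); Pre_ excludes rows that are empty lists.
def Pre_delete_after_third_number (direcciones_split : List (List String)) : Prop :=
  ∀ l ∈ direcciones_split, l ≠ []
instance (direcciones_split : List (List String)) : Decidable (Pre_delete_after_third_number direcciones_split) := by unfold Pre_delete_after_third_number; infer_instance

def pvWitness_delete_after_third_number : List (List String) :=
  [["*", "x"], ["Calle", "1", "no", "2", "-", "3", "sur", "4"], ["Av", "68"]]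

def Spec_delete_after_third_number (direcciones_split : List (List String)) (out : List (List String)) : Prop := out = delete_after_third_number_alt direcciones_split
instance (direcciones_split : List (List String)) (out : List (List String)) : Decidable (Spec_delete_after_third_number direcciones_split out) := by unfold Spec_delete_after_third_number; infer_instance

-- ===== CLAIM (what is proved, stated in full; the proofs are below) =====
def Claim_equal_delete_after_third_number : Prop := ∀ (direcciones_split : List (List String)), Dom_delete_after_third_number direcciones_split → Pre_delete_after_third_number direcciones_split → Spec_delete_after_third_number direcciones_split (delete_after_third_number direcciones_split)

-- ===== LEMMAS AND PROOFS =====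

-- nat-level view of A's digit-index list
def pvIdxs (l : List String) : List Nat :=
  (List.range l.length).filter (fun i => PySem.Str.strIsdigit (l.getD i ""))

theorem pvDigitIndices_eq (l : List String) :
    pvDigitIndices l = (pvIdxs l).map (fun n : Nat => (n : Int)) := by
  unfold pvDigitIndices pvIdxs
  rw [PySem.List.foldl_append_if_eq_filter, PySem.List.pyRange_zero_natCast,
    List.filter_map]
  simp only [List.nil_append]
  have hfc : ∀ x ∈ List.range l.length,
      ((fun i => PySem.Str.strIsdigit (PySem.List.pyGetD l i "")) ∘ (fun k => ((k : Nat) : Int))) x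
        = (fun i => PySem.Str.strIsdigit (l.getD i "")) x := by
    intro x _
    simp [Function.comp, List.getD]
  rw [List.filter_congr hfc]

theorem pvIdxs_cons (t : String) (ts : List String) :
    pvIdxs (t :: ts)
      = (if PySem.Str.strIsdigit t then [0] else []) ++ (pvIdxs ts).map (· + 1) := by
  unfold pvIdxs
  simp only [List.length_cons]
  rw [List.range_succ_eq_map, List.filter_cons, List.filter_map]
  have hfc : List.filter ((fun i => PySem.Str.strIsdigit ((t :: ts).getD i "")) ∘ (fun x => x + 1))
      (List.range ts.length)
      = List.filter (fun i => PySem.Str.strIsdigit (ts.getD i "")) (List.range ts.length) := by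
    apply List.filter_congr
    intro i _
    rfl
  rw [hfc]
  by_cases hd : PySem.Chars.strIsdigit t.toList <;>
    simp [hd, List.getD]

theorem pvKey (l : List String) : ∀ c : Nat, c ≤ 2 →
    (match (pvIdxs l)[2 - c]? with
     | some k => l.take (k + 1)
     | none => l) = pvKeepUntilThird l c := by
  induction l with
  | nil => intro c _; simp [pvIdxs, pvKeepUntilThird]
  | cons t ts ih =>
    intro c hc
    rw [pvIdxs_cons]
    by_cases hd : PySem.Str.strIsdigit t
    · simp only [hd, if_true]
      by_cases hc2 : c = 2
      · subst hc2
        simp only [pvKeepUntilThird, hd, if_true]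
        norm_num
      · have h1 : 1 ≤ 2 - c := by omega
        have hgl : (([0] ++ (pvIdxs ts).map (· + 1)) : List Nat)[2 - c]?
            = ((pvIdxs ts)[2 - (c + 1)]?).map (· + 1) := by
          rcases Nat.exists_eq_add_of_le h1 with ⟨m, hm⟩
          have hm' : 2 - (c + 1) = m := by omega
          rw [hm, hm', Nat.add_comm 1 m]
          simp
        rw [hgl]
        have ih' := ih (c + 1) (by omega)
        simp only [pvKeepUntilThird, hd, if_true, if_neg (by omega : ¬ c + 1 = 3)]
        rcases hx : (pvIdxs ts)[2 - (c + 1)]? with _ | k <;>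
          rw [hx] at ih' <;> simp at ih' ⊢ <;> simp [← ih']
    · rw [Bool.not_eq_true] at hd
      simp only [hd, Bool.false_eq_true, if_false, List.nil_append]
      have hgl : (((pvIdxs ts).map (· + 1)) : List Nat)[2 - c]?
          = ((pvIdxs ts)[2 - c]?).map (· + 1) := by simp
      rw [hgl]
      have ih' := ih c hc
      simp only [pvKeepUntilThird, hd, Bool.false_eq_true, if_false]
      rcases hx : (pvIdxs ts)[2 - c]? with _ | k <;>
        rw [hx] at ih' <;> simp at ih' ⊢ <;> simp [← ih']

theorem pvRow_eq (l : List String) (hne : l ≠ []) : pvRowA l = pvRowB l := by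
  rcases l with _ | ⟨t, ts⟩
  · exact absurd rfl hne
  unfold pvRowA pvRowB
  rw [show (0 : Int) = ((0 : Nat) : Int) from rfl]
  simp only [PySem.List.pyGet?_natCast, List.getElem?_cons_zero]
  by_cases hstar : t = "*"
  · subst hstar
    rw [PySem.List.index?_cons_self]
    simp
  · simp only [if_neg hstar]
    have hkey := pvKey (t :: ts) 0 (by omega)
    rw [pvDigitIndices_eq]
    rcases hx : (pvIdxs (t :: ts))[2]? with _ | k
    · have hg0 : PySem.List.pyGet? ((pvIdxs (t :: ts)).map (fun n : Nat => (n : Int))) 2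
          = none := by
        rw [show (2 : Int) = ((2 : Nat) : Int) from rfl, PySem.List.pyGet?_natCast]
        simp [hx]
      rw [hg0]
      simpa [hx] using hkey
    · have hs : PySem.List.slice (t :: ts) none (some ((k : Int) + 1))
          = (t :: ts).take (k + 1) := by
        have : ((k : Int) + 1) = ((k + 1 : Nat) : Int) := by push_cast; ring
        rw [this, PySem.List.slice_to_natCast]
      have hg : PySem.List.pyGet? ((pvIdxs (t :: ts)).map (fun n : Nat => (n : Int))) 2
          = some ((k : Int)) := by
        have h2 : (2 : Int) = ((2 : Nat) : Int) := rfl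
        rw [h2, PySem.List.pyGet?_natCast]
        simp [hx]
      rw [hg]
      simp only [hs]
      simpa [hx] using hkey

-- ===== VERDICT (by name: the statement is the Claim_ definition above) =====
theorem delete_after_third_number_spec : Claim_equal_delete_after_third_number := by
  intro ds _ hpre
  unfold Spec_delete_after_third_number delete_after_third_number delete_after_third_number_alt
  exact List.map_congr_left (fun l hl => pvRow_eq l (hpre l hl))
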